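-- pv_equiv track=rewrite | github.com/SysAdminDoc/Flux | flux-torrent/flux/gui/dialogs/create_torrent.py | _auto_piece_size
-- ===== SOURCE A (Python) =====
-- def _auto_piece_size(total_bytes: int) -> int:
--     """Pick a piece size that targets ~1500 pieces."""
--     if total_bytes <= 0:
--         return 262144
--     target = total_bytes // 1500
--     # Clamp to powers of 2 between 16K and 16M
--     size = 16384
--     while size < target and size < 16777216:
--         size *= 2
--     return size
-- ===== SOURCE B (Python) =====
-- def _auto_piece_size(total_bytes: int) -> int:
--     """Pick a piece size that targets ~1500 pieces."""
--     if total_bytes <= 0: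
--         return 262144
--     target = total_bytes // 1500
--     if target <= 16384:
--         return 16384
--     return min(1 << (target - 1).bit_length(), 16777216)
-- ===== Notes on version B (the rewrite author's own statement) =====
-- stated objective: idiomatic
-- what changed: Replaced the doubling while-loop with a closed-form bit_length computation of the smallest power of two at least the piece-count target, clamped to the same 16K-16M range.
import Mathlib
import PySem

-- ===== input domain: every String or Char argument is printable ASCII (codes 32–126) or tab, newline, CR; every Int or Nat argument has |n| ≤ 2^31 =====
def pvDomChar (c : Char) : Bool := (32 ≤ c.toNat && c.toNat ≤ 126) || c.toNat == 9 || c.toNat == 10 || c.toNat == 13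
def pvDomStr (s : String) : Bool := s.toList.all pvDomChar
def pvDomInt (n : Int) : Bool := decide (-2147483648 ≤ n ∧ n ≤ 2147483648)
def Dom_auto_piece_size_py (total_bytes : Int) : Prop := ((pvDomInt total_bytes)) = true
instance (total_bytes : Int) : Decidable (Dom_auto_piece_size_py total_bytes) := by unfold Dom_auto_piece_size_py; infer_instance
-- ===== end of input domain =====

-- B replaces A's doubling while-loop with a closed-form bit_length computation (same values; no speed claim).

-- ===== PORT A =====
-- the while-loop; fuel 11 is exact: size doubles from 16384 and the guard stops it at 16777216 after at most 10 doublings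
def apsLoop (target : Int) : Nat → Int → Int
  | 0, size => size
  | f + 1, size => if size < target ∧ size < 16777216 then apsLoop target f (size * 2) else size

def auto_piece_size_py (total_bytes : Int) : Int :=
  if total_bytes ≤ 0 then 262144
  else apsLoop (PySem.Int.floordiv total_bytes 1500) 11 16384

-- ===== PORT B =====
def auto_piece_size_py_alt (total_bytes : Int) : Int :=
  if total_bytes ≤ 0 then 262144
  else
    let target := PySem.Int.floordiv total_bytes 1500
    if target ≤ 16384 then 16384
    else min ((2 : Int) ^ PySem.Int.bitLength (target - 1)) 16777216

-- ===== PRECONDITION & SPEC =====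
def Spec_auto_piece_size_py (total_bytes : Int) (out : Int) : Prop := out = auto_piece_size_py_alt total_bytes
instance (total_bytes : Int) (out : Int) : Decidable (Spec_auto_piece_size_py total_bytes out) := by unfold Spec_auto_piece_size_py; infer_instance

-- ===== CLAIM (what is proved, stated in full; the proofs are below) =====
def Claim_equal_auto_piece_size_py : Prop := ∀ (total_bytes : Int), Dom_auto_piece_size_py total_bytes → Spec_auto_piece_size_py total_bytes (auto_piece_size_py total_bytes)

-- ===== LEMMAS AND PROOFS =====

-- the loop returns its size unchanged once the target is reached
theorem apsLoop_stop (t : Int) (f : Nat) (s : Int) (h : ¬ s < t) : apsLoop t f s = s := by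
  cases f with
  | zero => rfl
  | succ f => simp only [apsLoop]; rw [if_neg]; intro hc; exact h hc.1

-- bitLength is characterised by the enclosing power-of-two interval
theorem bitLength_eq_of (n : Int) (k : Nat) (h1 : (2 : Int) ^ k ≤ n) (h2 : n < 2 ^ (k + 1)) :
    PySem.Int.bitLength n = k + 1 := by
  have hn0 : 0 < n := lt_of_lt_of_le (by positivity) h1
  have hne : n ≠ 0 := ne_of_gt hn0
  have hlo := PySem.Int.two_pow_bitLength_le n hne
  have hhi := PySem.Int.lt_two_pow_bitLength n
  have hcast : ((n.natAbs : Int)) = n := Int.natAbs_of_nonneg (le_of_lt hn0)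
  have h1' : 2 ^ k ≤ n.natAbs := by
    have h := h1; rw [← hcast] at h; exact_mod_cast h
  have h2' : n.natAbs < 2 ^ (k + 1) := by
    have h := h2; rw [← hcast] at h; exact_mod_cast h
  set a := PySem.Int.bitLength n with ha
  have hak : k < a := by
    by_contra h
    push Not at h
    have : (2:ℕ) ^ a ≤ 2 ^ k := Nat.pow_le_pow_right (by norm_num) h
    omega
  have hka : a - 1 ≤ k := by
    by_contra h
    push Not at h
    have : (2:ℕ) ^ (k+1) ≤ 2 ^ (a-1) := Nat.pow_le_pow_right (by norm_num) h
    omega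
  omega

-- loop invariant: starting from 2^j below the (bounded) target, the loop stops at the
-- smallest power of two that is at least target, which is 2^(bitLength (target-1))
theorem apsLoop_pow (target : Int) (htop : target ≤ 2 ^ 21) :
    ∀ (f j : Nat), (2:Int) ^ j < target → target ≤ 2 ^ (j + f) →
      apsLoop target f ((2:Int) ^ j) = 2 ^ PySem.Int.bitLength (target - 1) := by
  intro f
  induction f with
  | zero =>
    intro j hj hf
    simp only [Nat.add_zero] at hf
    omega
  | succ f ih =>
    intro j hj hf
    have hjlt : (2:Int) ^ j < 2 ^ 21 := lt_of_lt_of_le hj htop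
    have hguard : (2:Int) ^ j < 16777216 := lt_of_lt_of_le hjlt (by norm_num)
    simp only [apsLoop, if_pos (And.intro hj hguard)]
    have hdouble : (2:Int) ^ j * 2 = 2 ^ (j + 1) := by ring
    rw [hdouble]
    rcases lt_or_ge ((2:Int) ^ (j+1)) target with h | h
    · exact ih (j + 1) h (by rw [show j + 1 + f = j + (f + 1) by omega]; exact hf)
    · rw [apsLoop_stop target f _ (not_lt.mpr h)]
      rw [bitLength_eq_of (target - 1) j (by omega) (by omega)]

-- in the domain, target ≤ 1431655 < 2^21
theorem main_eq (target : Int) (h0 : 16384 < target) (h1 : target ≤ 1431655) :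
    apsLoop target 11 16384 = min ((2 : Int) ^ PySem.Int.bitLength (target - 1)) 16777216 := by
  have htop : target ≤ 2 ^ 21 := le_trans h1 (by norm_num)
  have h14 : (16384 : Int) = 2 ^ 14 := by norm_num
  rw [h14, apsLoop_pow target htop 11 14 (by norm_num; omega) (by norm_num; omega)]
  -- the 16M clamp never fires: bitLength (target - 1) ≤ 21
  have hne : target - 1 ≠ 0 := by omega
  have hlo := PySem.Int.two_pow_bitLength_le (target - 1) hne
  have hbl : PySem.Int.bitLength (target - 1) ≤ 21 := by
    by_contra h
    push Not at h
    have : (2:ℕ) ^ 21 ≤ 2 ^ (PySem.Int.bitLength (target - 1) - 1) :=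
      Nat.pow_le_pow_right (by norm_num) (by omega)
    have habs : (target - 1).natAbs ≤ 1431654 := by omega
    omega
  have : (2:Int) ^ PySem.Int.bitLength (target - 1) ≤ 2 ^ 21 :=
    pow_le_pow_right₀ (by norm_num) hbl
  have h21 : (2:Int) ^ 21 ≤ 16777216 := by norm_num
  omega

-- ===== VERDICT (by name: the statement is the Claim_ definition above) =====
theorem auto_piece_size_py_spec : Claim_equal_auto_piece_size_py := by
  intro tb hDom
  unfold Spec_auto_piece_size_py auto_piece_size_py auto_piece_size_py_alt
  rcases le_or_gt tb 0 with h | h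
  · simp [h]
  · have hne : ¬ tb ≤ 0 := not_le.mpr h
    simp only [if_neg hne]
    set target := PySem.Int.floordiv tb 1500 with ht
    have hDom' : tb ≤ 2147483648 := by
      unfold Dom_auto_piece_size_py pvDomInt at hDom
      simpa using (of_decide_eq_true hDom).2
    have htle : target ≤ 1431655 := by
      have : target < 1431656 := by
        rw [ht, PySem.Int.floordiv_lt_iff_lt_mul (by norm_num)]
        omega
      omega
    rcases le_or_gt target 16384 with h2 | h2
    · rw [apsLoop_stop target 11 16384 (by omega), if_pos h2]
    · rw [if_neg (not_le.mpr h2)]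
      exact main_eq target h2 htle
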